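-- pv_equiv track=rewrite | github.com/GreenJav/Code-Cool-Things | PythonCodes/pythonCodes/kTimes.py | kTimes
-- ===== SOURCE A (Python) =====
-- import math
--
-- def tam(numero): #funcao auxiliar
--     numero = abs(int(numero))
--     return (1 if numero == 0 else math.floor(math.log10(numero)) + 1)
--
-- def kTimes(n, k):
--     if n < k:
--         return 0
--     if n % (10 ** tam(k)) == k:
--         c = 1
--     else:
--         c = 0
--     return c + kTimes(n // 10, k) #chamada recursiva
-- ===== SOURCE B (Python) =====
-- def tam(numero):  # digit count, computed iteratively instead of via math.log10
--     numero = abs(int(numero))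
--     d = 1
--     while numero >= 10:
--         numero //= 10
--         d += 1
--     return d
--
-- def kTimes(n, k):
--     count = 0
--     while n >= k:
--         if n % (10 ** tam(k)) == k:
--             count += 1
--         n //= 10
--     return count
-- ===== Notes on version B (the rewrite author's own statement) =====
-- stated objective: simpler
-- what changed: Replaces A's recursive descent (and its math.log10-based digit count) with a plain iterative while-loop accumulating a counter, with the digit length of k computed by repeated division.
import Mathlib
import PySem

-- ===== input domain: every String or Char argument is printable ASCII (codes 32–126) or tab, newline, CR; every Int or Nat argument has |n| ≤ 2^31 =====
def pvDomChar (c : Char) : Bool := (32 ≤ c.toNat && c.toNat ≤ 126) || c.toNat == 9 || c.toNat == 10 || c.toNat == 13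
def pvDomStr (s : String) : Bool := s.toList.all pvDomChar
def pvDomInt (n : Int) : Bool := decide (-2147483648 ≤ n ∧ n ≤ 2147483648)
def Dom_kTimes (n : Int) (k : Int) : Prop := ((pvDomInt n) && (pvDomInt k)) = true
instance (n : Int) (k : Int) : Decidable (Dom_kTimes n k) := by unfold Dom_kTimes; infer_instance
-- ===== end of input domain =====

-- B replaces A's recursion (and its math.log10-based digit count) with an iterative counter loop; objective: simpler.


-- ===== PORT A =====
-- tam: math.floor(math.log10(|x|)) + 1 is the decimal digit count; ported by hand as Nat.log 10 + 1,
-- which is exact for the integers admitted by Dom (|x| ≤ 2^31, where float log10 never misrounds).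
def tamA (numero : Int) : Nat :=
  if numero.natAbs = 0 then 1 else Nat.log 10 numero.natAbs + 1

-- A's recursion, made total with a fuel argument (n.toNat + 1 steps always suffice on Pre_,
-- since n strictly decreases toward the n < k base case; for k ≤ 0 with n ≥ k — outside Pre_ —
-- Python recurses forever and dies with RecursionError, and the fuel simply runs out).
def kTimesGoA (fuel : Nat) (n : Int) (k : Int) : Int :=
  match fuel with
  | 0 => 0
  | fuel + 1 =>
    if n < k then 0
    else (if PySem.Int.mod n (10 ^ tamA k) = k then 1 else 0)
           + kTimesGoA fuel (PySem.Int.floordiv n 10) k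

def kTimes (n : Int) (k : Int) : Int := kTimesGoA (n.toNat + 1) n k

-- ===== PORT B =====
-- Source B's iterative tam: d starts at 1, loop `while numero >= 10: numero //= 10; d += 1`
-- (fuel m suffices: the loop runs at most log10 m ≤ m times).
def tamBgo (fuel : Nat) (m : Nat) (d : Nat) : Nat :=
  match fuel with
  | 0 => d
  | fuel + 1 => if 10 ≤ m then tamBgo fuel (m / 10) (d + 1) else d

def tamB (numero : Int) : Nat := tamBgo numero.natAbs numero.natAbs 1

-- Source B's while-loop with accumulator count, same fuel device as port A
def kTimesAltGo (fuel : Nat) (n : Int) (k : Int) (count : Int) : Int :=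
  match fuel with
  | 0 => count
  | fuel + 1 =>
    if n < k then count
    else kTimesAltGo fuel (PySem.Int.floordiv n 10) k
           (count + (if PySem.Int.mod n (10 ^ tamB k) = k then 1 else 0))

def kTimes_alt (n : Int) (k : Int) : Int := kTimesAltGo (n.toNat + 1) n k 0

-- ===== PRECONDITION & SPEC =====
-- Pre_ excludes exactly the inputs on which A never returns: for k ≤ 0 with n ≥ k the
-- recursion n //= 10 never drops n below k and Python dies with RecursionError.
def Pre_kTimes (n : Int) (k : Int) : Prop := 1 ≤ k ∨ n < k
instance (n : Int) (k : Int) : Decidable (Pre_kTimes n k) := by unfold Pre_kTimes; infer_instance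

def pvWitness_kTimes : Int × Int := (10783, 7)

def Spec_kTimes (n : Int) (k : Int) (out : Int) : Prop := out = kTimes_alt n k
instance (n : Int) (k : Int) (out : Int) : Decidable (Spec_kTimes n k out) := by unfold Spec_kTimes; infer_instance

-- ===== CLAIM (what is proved, stated in full; the proofs are below) =====
def Claim_equal_kTimes : Prop := ∀ (n : Int) (k : Int), Dom_kTimes n k → Pre_kTimes n k → Spec_kTimes n k (kTimes n k)

-- ===== LEMMAS AND PROOFS =====

-- the iterative digit count equals the log-based one (fuel ≥ m is plenty: m shrinks by /10 each step)
lemma tamBgo_eq (fuel : Nat) : ∀ (m d : Nat), m ≤ fuel → 1 ≤ m → tamBgo fuel m d = d + Nat.log 10 m := by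
  induction fuel with
  | zero => intro m d hm h1; omega
  | succ fuel ih =>
    intro m d hm h1
    rw [tamBgo]
    by_cases h : 10 ≤ m
    · rw [if_pos h, ih (m / 10) (d + 1) (by omega) (by omega)]
      rw [Nat.log_div_base 10 m]
      have := Nat.log_pos (b := 10) (by omega) h
      omega
    · have h0 : Nat.log 10 m = 0 := Nat.log_eq_zero_iff.mpr (Or.inl (by omega))
      rw [if_neg h, h0]
      omega

lemma tamB_eq_tamA (k : Int) (hk : 1 ≤ k) : tamB k = tamA k := by
  have h1 : 1 ≤ k.natAbs := by omega
  have hne : ¬ k.natAbs = 0 := by omega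
  simp [tamB, tamA, tamBgo_eq k.natAbs k.natAbs 1 le_rfl h1, hne]
  omega

-- loop invariant: with the same (sufficient) fuel, B's accumulator loop carries A's result
lemma go_eq (k : Int) (hk : 1 ≤ k) :
    ∀ (fuel : Nat) (n : Int), n.toNat < fuel → ∀ (c : Int),
      kTimesAltGo fuel n k c = c + kTimesGoA fuel n k := by
  intro fuel
  induction fuel with
  | zero => intro n hn c; omega
  | succ fuel ih =>
    intro n hn c
    rw [kTimesAltGo, kTimesGoA]
    by_cases h : n < k
    · simp [h]
    · have hdiv : PySem.Int.floordiv n 10 = n / 10 :=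
        PySem.Int.floordiv_eq_ediv_of_pos (by omega)
      rw [if_neg h, if_neg h, tamB_eq_tamA k hk,
        ih (PySem.Int.floordiv n 10) (by rw [hdiv]; omega)]
      ring

theorem kTimes_spec : Claim_equal_kTimes := by
  intro n k _ hpre
  unfold Spec_kTimes kTimes_alt kTimes
  rcases hpre with hk | hlt
  · rw [go_eq k hk (n.toNat + 1) n (by omega) 0]; ring
  · rw [kTimesAltGo, if_pos hlt, kTimesGoA, if_pos hlt]
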